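-- pv_equiv track=rewrite | github.com/Nicollas42/nitec-api | agente_ia_local/base_conhecimento.py | mapear_secoes_markdown
-- ===== SOURCE A (Python) =====
-- def mapear_secoes_markdown(conteudo_normalizado: str) -> dict[str, str]:
--     """Mapeia secoes do markdown pelo titulo para selecao posterior."""
--
--     secoes: dict[str, list[str]] = {}
--     titulo_atual = "__inicio__"
--     secoes[titulo_atual] = []
--
--     for linha in conteudo_normalizado.split("\n"):
--         if linha.startswith("## ") or linha.startswith("### "):
--             titulo_atual = linha.strip()
--             secoes.setdefault(titulo_atual, [])
--
--         secoes[titulo_atual].append(linha)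
--
--     return {
--         titulo: "\n".join(linhas).strip()
--         for titulo, linhas in secoes.items()
--         if any(linha.strip() for linha in linhas)
--     }
-- ===== SOURCE B (Python) =====
-- def mapear_secoes_markdown(conteudo_normalizado: str) -> dict[str, str]:
--     """Mapeia secoes do markdown pelo titulo para selecao posterior.
--
--     Block decomposition: split the lines at header boundaries into
--     (title, block) slices, then merge the blocks into an ordered dict.
--     """
--
--     def eh_titulo(linha):
--         return linha.startswith("## ") or linha.startswith("### ")
--
--     secoes: dict[str, list[str]] = {}
--
--     def acumula(titulo, bloco):
--         secoes.setdefault(titulo, []).extend(bloco)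
--
--     linhas = conteudo_normalizado.split("\n")
--
--     corte = 0
--     while corte < len(linhas) and not eh_titulo(linhas[corte]):
--         corte += 1
--     acumula("__inicio__", linhas[:corte])
--
--     resto = linhas[corte:]
--     while resto:
--         cabeca, cauda = resto[0], resto[1:]
--         corte = 0
--         while corte < len(cauda) and not eh_titulo(cauda[corte]):
--             corte += 1
--         acumula(cabeca.strip(), [cabeca] + cauda[:corte])
--         resto = cauda[corte:]
--
--     return {
--         titulo: "\n".join(bloco).strip()
--         for titulo, bloco in secoes.items()
--         if any(l.strip() for l in bloco)
--     }
-- ===== Notes on version B (the rewrite author's own statement) =====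
-- stated objective: alternative
-- what changed: B replaces A's single line-by-line fold carrying a current-title state with a block decomposition: it spans the line list into (title, block) slices at header boundaries and merges each whole slice into the dict with setdefault+extend.
import Mathlib
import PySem

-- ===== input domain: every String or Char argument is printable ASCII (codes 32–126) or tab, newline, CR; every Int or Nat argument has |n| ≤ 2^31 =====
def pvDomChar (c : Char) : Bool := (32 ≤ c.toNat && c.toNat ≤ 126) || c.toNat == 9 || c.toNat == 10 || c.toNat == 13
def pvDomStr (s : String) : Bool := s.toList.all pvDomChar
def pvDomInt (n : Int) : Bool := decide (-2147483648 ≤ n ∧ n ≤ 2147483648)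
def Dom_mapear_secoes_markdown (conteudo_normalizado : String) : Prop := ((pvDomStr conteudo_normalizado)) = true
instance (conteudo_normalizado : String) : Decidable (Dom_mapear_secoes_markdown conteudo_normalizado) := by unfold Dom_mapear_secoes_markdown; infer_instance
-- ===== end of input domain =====

-- B groups the lines by slicing them into header-delimited blocks instead of A's
-- line-by-line fold with a current-title register; same O(n) cost (objective: alternative).

-- both ports: conteudo_normalizado.split("\n") (sep nonempty, so Chars.splitOn is exact)
def pvLinhas (s : String) : List String :=
  (PySem.Chars.splitOn s.toList ['\n']).map String.ofList

-- helper shared by both ports: the header test ('## ' or '### ' prefix)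
def pvIsHeader (l : String) : Bool :=
  PySem.Str.startswith l "## " || PySem.Str.startswith l "### "

-- helper shared by both ports: the final dict comprehension
-- {titulo: "\n".join(linhas).strip() for … if any(linha.strip() for linha in linhas)}
def pvFinaliza (d : PySem.Dict String (List String)) : List (String × String) :=
  (d.items.filter (fun p => p.2.any (fun l => !(PySem.Str.strip l == "")))).map
    (fun p => (p.1, PySem.Str.strip (PySem.Str.join "\n" p.2)))

-- ===== PORT A =====
-- one loop iteration of A; 'secoes[titulo_atual].append(linha)' is ported as
-- Dict.modify (exact here: titulo_atual is always a key of the dict on every reachable state)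
def pvStepA (st : PySem.Dict String (List String) × String) (linha : String) :
    PySem.Dict String (List String) × String :=
  let st :=
    if pvIsHeader linha then
      let t := PySem.Str.strip linha
      (st.1.setdefault t [], t)
    else st
  (st.1.modify st.2 [] (fun ls => ls ++ [linha]), st.2)

def mapear_secoes_markdown (conteudo_normalizado : String) : List (String × String) :=
  let d0 := (PySem.Dict.empty : PySem.Dict String (List String)).insert "__inicio__" []
  let st := (pvLinhas conteudo_normalizado).foldl pvStepA (d0, "__inicio__")
  pvFinaliza st.1

-- ===== PORT B =====
-- acumula(titulo, bloco): secoes.setdefault(titulo, []).extend(bloco)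
def pvAcumula (d : PySem.Dict String (List String)) (t : String) (bloco : List String) :
    PySem.Dict String (List String) :=
  (d.setdefault t []).modify t [] (fun ls => ls ++ bloco)

-- the 'while resto:' loop: peel the header line, span off its body, merge the block
def pvAgrupa (d : PySem.Dict String (List String)) : List String → PySem.Dict String (List String)
  | [] => d
  | cabeca :: cauda =>
      pvAgrupa (pvAcumula d (PySem.Str.strip cabeca)
                  (cabeca :: cauda.takeWhile (fun l => !pvIsHeader l)))
        (cauda.dropWhile (fun l => !pvIsHeader l))
  termination_by linhas => linhas.length
  decreasing_by
    simpa using Nat.lt_succ_of_le (cauda.length_dropWhile_le _)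

def mapear_secoes_markdown_alt (conteudo_normalizado : String) : List (String × String) :=
  let linhas := pvLinhas conteudo_normalizado
  let d := pvAcumula PySem.Dict.empty "__inicio__" (List.takeWhile (fun l => !pvIsHeader l) linhas)
  pvFinaliza (pvAgrupa d (List.dropWhile (fun l => !pvIsHeader l) linhas))

-- ===== PRECONDITION & SPEC =====
def Spec_mapear_secoes_markdown (conteudo_normalizado : String) (out : List (String × String)) : Prop := out = mapear_secoes_markdown_alt conteudo_normalizado
instance (conteudo_normalizado : String) (out : List (String × String)) : Decidable (Spec_mapear_secoes_markdown conteudo_normalizado out) := by unfold Spec_mapear_secoes_markdown; infer_instance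

-- ===== CLAIM (what is proved, stated in full; the proofs are below) =====
def Claim_equal_mapear_secoes_markdown : Prop := ∀ (conteudo_normalizado : String), Dom_mapear_secoes_markdown conteudo_normalizado → Spec_mapear_secoes_markdown conteudo_normalizado (mapear_secoes_markdown conteudo_normalizado)

-- ===== LEMMAS AND PROOFS =====

-- list-level core of pv_insert_self
theorem pv_map_replace_self {κ ν : Type} [BEq κ] [LawfulBEq κ] :
    ∀ (l : List (κ × ν)) (k : κ) (v : ν), (l.map (fun p => p.1)).Nodup →
      (l.find? (fun p => p.1 == k)).map (fun p => p.2) = some v →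
      l.map (fun p => if p.1 == k then (k, v) else p) = l := by
  intro l
  induction l with
  | nil => intro k v _ h; simp at h
  | cons a rest ih =>
    intro k v hnd h
    by_cases ha : (a.1 == k) = true
    · have hk : a.1 = k := by simpa using ha
      simp only [List.find?_cons, ha] at h
      simp only [Option.map_some, Option.some.injEq] at h
      simp only [List.map_cons, ha, if_true]
      have hhead : (k, v) = a := by
        cases a; simp_all
      refine (congrArg₂ List.cons hhead ?_ : _)
      have hrest : ∀ p ∈ rest, (p.1 == k) = false := by
        intro p hp
        simp only [List.map_cons, List.nodup_cons] at hnd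
        have : a.1 ∉ rest.map (fun p => p.1) := hnd.1
        rw [beq_eq_false_iff_ne]
        intro e
        exact this (hk ▸ e ▸ List.mem_map_of_mem hp)
      calc rest.map (fun p => if p.1 == k then (k, v) else p)
          = rest.map id := List.map_congr_left (fun p hp => by rw [hrest p hp]; rfl)
        _ = rest := List.map_id rest
    · have ha' : (a.1 == k) = false := by simpa using ha
      simp only [List.find?_cons, ha'] at h
      simp only [List.map_cons, ha', Bool.false_eq_true, if_false]
      rw [ih k v (by simp only [List.map_cons, List.nodup_cons] at hnd; exact hnd.2) h]

-- inserting at a key the value it already (uniquely) holds changes nothing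
theorem pv_insert_self {κ ν : Type} [BEq κ] [LawfulBEq κ] (d : PySem.Dict κ ν) (k : κ) (v : ν)
    (hnd : d.keys.Nodup) (h : d.get? k = some v) : d.insert k v = d := by
  have hc : d.contains k = true := by
    cases hcc : d.contains k
    · rw [← PySem.Dict.get?_eq_none_iff_contains] at hcc; rw [hcc] at h; cases h
    · rfl
  apply PySem.Dict.ext
  simp only [PySem.Dict.insert, hc, if_true]
  exact pv_map_replace_self d.items k v hnd h

-- overwriting the same key twice keeps only the second write
theorem pv_insert_insert {κ ν : Type} [BEq κ] [LawfulBEq κ] (d : PySem.Dict κ ν) (k : κ) (v w : ν) :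
    (d.insert k v).insert k w = d.insert k w := by
  apply PySem.Dict.ext
  cases hdk : (d.items.any fun p => p.1 == k) with
  | true =>
    have hdk' : (d.items.map (fun p => if (p.1 == k) = true then (k, v) else p)).any
        (fun p => p.1 == k) = true := by
      rw [List.any_eq_true] at hdk
      obtain ⟨p, hp, hpk⟩ := hdk
      exact List.any_eq_true.mpr ⟨(k, v), List.mem_map.mpr ⟨p, hp, by simp [hpk]⟩, by simp⟩
    simp only [PySem.Dict.insert, PySem.Dict.contains, hdk, if_true, hdk', List.map_map]
    apply List.map_congr_left
    intro p _
    by_cases hp : (p.1 == k) = true <;> simp [hp]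
  | false =>
    have hdk' : ((d.items ++ [(k, v)]).any (fun p => p.1 == k)) = true := by simp
    have hni : ∀ p ∈ d.items, (p.1 == k) = false := by
      intro p hp
      cases hpk : (p.1 == k)
      · rfl
      · exfalso
        have : (d.items.any fun p => p.1 == k) = true := List.any_eq_true.mpr ⟨p, hp, hpk⟩
        rw [this] at hdk; cases hdk
    simp only [PySem.Dict.insert, PySem.Dict.contains, hdk, Bool.false_eq_true, if_false,
      hdk', if_true, List.map_append]
    congr 1
    · calc d.items.map (fun p => if (p.1 == k) = true then (k, w) else p)
          = d.items.map id := List.map_congr_left (fun p hp => by rw [hni p hp]; rfl)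
        _ = d.items := List.map_id _
    · simp

theorem pv_nodup_keys_setdefault {κ ν : Type} [BEq κ] [LawfulBEq κ] (d : PySem.Dict κ ν) (k : κ)
    (v : ν) (hnd : d.keys.Nodup) : (d.setdefault k v).keys.Nodup := by
  rw [PySem.Dict.keys_setdefault]
  split
  · exact hnd
  · rename_i hc
    have hk : k ∉ d.keys := by
      intro hm
      rw [← PySem.Dict.contains_iff_mem_keys] at hm
      simp [hm] at hc
    rw [List.nodup_append]
    refine ⟨hnd, List.nodup_singleton _, fun a ha b hb => ?_⟩
    rw [List.mem_singleton] at hb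
    subst hb
    exact fun e => hk (e ▸ ha)

-- merging an empty block is a no-op (the title being a key of the dict)
theorem pv_acumula_nil (d : PySem.Dict String (List String)) (t : String)
    (hnd : d.keys.Nodup) (hc : d.contains t = true) : pvAcumula d t [] = d := by
  rw [pvAcumula, PySem.Dict.setdefault_of_contains _ _ hc, PySem.Dict.modify]
  simp only [List.append_nil]
  cases hv : d.get? t with
  | none => rw [PySem.Dict.get?_eq_none_iff_contains] at hv; simp [hv] at hc
  | some v => rw [PySem.Dict.getD, hv]; exact pv_insert_self d t v hnd hv

-- absorbing one appended line into the block being merged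
theorem pv_acumula_cons (d : PySem.Dict String (List String)) (t linha : String)
    (corpo : List String) :
    pvAcumula ((d.setdefault t []).modify t [] (fun ls => ls ++ [linha])) t corpo
      = pvAcumula d t (linha :: corpo) := by
  rw [pvAcumula, pvAcumula, PySem.Dict.modify, PySem.Dict.modify, PySem.Dict.modify]
  rw [PySem.Dict.setdefault_of_contains]
  · rw [PySem.Dict.getD_insert_self, pv_insert_insert]
    simp
  · rw [PySem.Dict.contains_insert]
    simp

-- the central invariant: A\'s line fold from any reachable state equals B\'s block recursion
theorem pv_main (linhas : List String) : ∀ (d : PySem.Dict String (List String)) (t : String),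
    d.keys.Nodup → d.contains t = true →
    (linhas.foldl pvStepA (d, t)).1
      = pvAgrupa (pvAcumula d t (List.takeWhile (fun l => !pvIsHeader l) linhas))
          (List.dropWhile (fun l => !pvIsHeader l) linhas) := by
  induction linhas with
  | nil =>
    intro d t hnd hc
    simp [pvAgrupa, pv_acumula_nil d t hnd hc]
  | cons linha rest ih =>
    intro d t hnd hc
    by_cases h : pvIsHeader linha = true
    · rw [List.foldl_cons]
      have hstep : pvStepA (d, t) linha
          = (((d.setdefault (PySem.Str.strip linha) []).modify (PySem.Str.strip linha) []
              (fun ls => ls ++ [linha])), PySem.Str.strip linha) := by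
        simp [pvStepA, h]
      rw [hstep]
      rw [List.takeWhile_cons, List.dropWhile_cons]
      simp only [h, Bool.not_true, Bool.false_eq_true, if_false]
      rw [pvAgrupa, pv_acumula_nil d t hnd hc]
      rw [ih _ _ ?_ ?_, pv_acumula_cons]
      · exact PySem.Dict.nodup_keys_insert _ _ _
          (pv_nodup_keys_setdefault _ _ _ hnd)
      · rw [PySem.Dict.modify, PySem.Dict.contains_insert]; simp
    · rw [List.foldl_cons]
      have hstep : pvStepA (d, t) linha
          = (d.modify t [] (fun ls => ls ++ [linha]), t) := by
        simp [pvStepA, h]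
      rw [hstep]
      rw [List.takeWhile_cons, List.dropWhile_cons]
      simp only [h, Bool.not_false, if_true]
      rw [ih _ _ ?_ ?_]
      · rw [← PySem.Dict.setdefault_of_contains d ([] : List String) hc, pv_acumula_cons,
          PySem.Dict.setdefault_of_contains d ([] : List String) hc]
      · exact PySem.Dict.nodup_keys_insert _ _ _ hnd
      · rw [PySem.Dict.modify, PySem.Dict.contains_insert]; simp

-- ===== VERDICT =====
theorem mapear_secoes_markdown_spec : Claim_equal_mapear_secoes_markdown := by
  intro c _
  have h := pv_main (pvLinhas c)
    ((PySem.Dict.empty : PySem.Dict String (List String)).insert "__inicio__" []) "__inicio__"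
    (by decide) (by decide)
  show mapear_secoes_markdown c = mapear_secoes_markdown_alt c
  show pvFinaliza ((List.foldl pvStepA
      ((PySem.Dict.empty : PySem.Dict String (List String)).insert "__inicio__" [], "__inicio__")
      (pvLinhas c)).1)
    = pvFinaliza (pvAgrupa
        (pvAcumula PySem.Dict.empty "__inicio__"
          (List.takeWhile (fun l => !pvIsHeader l) (pvLinhas c)))
        (List.dropWhile (fun l => !pvIsHeader l) (pvLinhas c)))
  rw [h]
  have e : pvAcumula ((PySem.Dict.empty : PySem.Dict String (List String)).insert "__inicio__" [])
      "__inicio__" (List.takeWhile (fun l => !pvIsHeader l) (pvLinhas c))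
      = pvAcumula PySem.Dict.empty "__inicio__" (List.takeWhile (fun l => !pvIsHeader l) (pvLinhas c)) := by
    rw [pvAcumula, pvAcumula,
      PySem.Dict.setdefault_of_contains _ _ (by decide),
      PySem.Dict.setdefault_of_not_contains _ _ (by decide)]
  rw [e]
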